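-- pv_equiv track=rewrite | github.com/janardannn/competitive_programming | googol_string.py | googol_sentence
-- ===== SOURCE A (Python) =====
-- def switch(x):
--     new_string = ""
--     for i in x:
--         if i == "0":
--             new_string += "1"
--         elif i =="1":
--             new_string += "0"
--     return new_string
--
-- def reverse(x):
--     new_string = x[::-1]
--     return new_string
--
-- def googol_sentence (x):
--     line = ""
--     prev_line = "0"
--     new_line = ""
--     if x > 3:
--         for i in range(3,x+2):
--             new_line = prev_line + "0" +switch(reverse(prev_line))
--             line = prev_line
--             prev_line = new_line
--         return new_line
--     if x<=3:
--         if x==3: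
--             return "0010011"
--         elif x==2:
--             return "001"
--         elif x==1:
--             return "0"
--         elif x ==0:
--             return ""
-- ===== SOURCE B (Python) =====
-- def googol_sentence(x):
--     chars = []
--     for n in range(1, 2 ** x):
--         m = n
--         while m % 2 == 0:
--             m //= 2
--         chars.append('0' if m % 4 == 1 else '1')
--     return ''.join(chars)
-- ===== Notes on version B (the rewrite author's own statement) =====
-- stated objective: alternative
-- what changed: B computes each character directly from its 1-based index n (the regular paperfolding rule: '0' iff the odd part of n is 1 mod 4) in one pass over range(1, 2**x), instead of A's iterative string doubling via prev + '0' + switch(reverse(prev)) with hardcoded small cases.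
-- outside the precondition, e.g. on googol_sentence(-1): A returns None, B raises TypeError
import Mathlib
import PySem

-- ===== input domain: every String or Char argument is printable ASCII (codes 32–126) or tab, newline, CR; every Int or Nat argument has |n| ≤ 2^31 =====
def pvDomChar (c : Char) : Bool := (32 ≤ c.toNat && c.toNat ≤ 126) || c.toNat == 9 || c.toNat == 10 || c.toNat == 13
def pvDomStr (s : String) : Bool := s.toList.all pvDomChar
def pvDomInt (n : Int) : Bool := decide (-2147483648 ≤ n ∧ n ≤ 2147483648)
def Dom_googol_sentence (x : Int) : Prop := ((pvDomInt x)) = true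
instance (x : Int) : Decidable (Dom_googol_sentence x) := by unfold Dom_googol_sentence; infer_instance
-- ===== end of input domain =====

-- B replaces A's iterative string doubling by the per-index paperfolding rule
-- ('0' iff the odd part of the 1-based position is 1 mod 4): a different algorithm of similar cost.


-- ===== PORT A =====
-- strings are carried as List Char (String.mk at the boundary); '+=' on a string is '++ [c]'
def pvSwitch (x : List Char) : List Char :=
  x.foldl (fun new_string i =>
    if i = '0' then new_string ++ ['1']
    else if i = '1' then new_string ++ ['0']
    else new_string) []

-- x[::-1] on a string is exactly List.reverse of its characters
def pvReverse (x : List Char) : List Char := x.reverse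

def googol_sentence (x : Int) : String :=
  -- state (line, prev_line, new_line), initial ("", "0", "")
  if x > 3 then
    let st := (PySem.List.pyRange 3 (x + 2) 1).foldl
      (fun (st : List Char × List Char × List Char) _ =>
        let new_line := st.2.1 ++ ['0'] ++ pvSwitch (pvReverse st.2.1)
        (st.2.1, new_line, new_line))
      ([], ['0'], [])
    String.mk st.2.2
  else  -- x <= 3 (A returns None for x < 0; excluded by Pre_, "" here)
    if x = 3 then "0010011"
    else if x = 2 then "001"
    else if x = 1 then "0"
    else ""

-- ===== PORT B =====
-- the while loop stripping factors of 2 (fuel = m bounds the iteration count; it is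
-- never exhausted since m halves each step, so this computes exactly the Python loop)
def pvOddPartGo : Nat → Nat → Nat
  | 0, m => m
  | fuel + 1, m => if m % 2 = 0 ∧ m ≠ 0 then pvOddPartGo fuel (m / 2) else m

def pvOddPart (m : Nat) : Nat := pvOddPartGo m m

def googol_sentence_alt (x : Int) : String :=
  String.mk ((PySem.List.pyRange 1 ((2 : Int) ^ x.toNat) 1).foldl
    (fun chars n => chars ++ [if pvOddPart n.toNat % 4 = 1 then '0' else '1']) [])

-- ===== PRECONDITION & SPEC =====
-- Pre_ excludes x < 0, where A falls through every branch and returns None (not a string).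
def Pre_googol_sentence (x : Int) : Prop := 0 ≤ x
instance (x : Int) : Decidable (Pre_googol_sentence x) := by unfold Pre_googol_sentence; infer_instance
def pvWitness_googol_sentence : Int := (4)

def Spec_googol_sentence (x : Int) (out : String) : Prop := out = googol_sentence_alt x
instance (x : Int) (out : String) : Decidable (Spec_googol_sentence x out) := by unfold Spec_googol_sentence; infer_instance

-- ===== CLAIM (what is proved, stated in full; the proofs are below) =====
def Claim_equal_googol_sentence : Prop := ∀ (x : Int), Dom_googol_sentence x → Pre_googol_sentence x → Spec_googol_sentence x (googol_sentence x)

-- ===== LEMMAS AND PROOFS =====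

-- the paperfolding character at 1-based position n
def pvPf (n : Nat) : Char := if pvOddPart n % 4 = 1 then '0' else '1'

-- the paperfolding word of length 2^k - 1
def pvP (k : Nat) : List Char := (List.range (2 ^ k - 1)).map (fun i => pvPf (i + 1))

def pvStepA (p : List Char) : List Char := p ++ ['0'] ++ pvSwitch (pvReverse p)

theorem pvOddPartGo_fuel : ∀ f1 f2 m, m ≤ f1 → m ≤ f2 →
    pvOddPartGo f1 m = pvOddPartGo f2 m := by
  intro f1
  induction f1 with
  | zero =>
    intro f2 m h1 _
    have : m = 0 := by omega
    subst this
    cases f2 <;> simp [pvOddPartGo]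
  | succ f1 ih =>
    intro f2 m h1 h2
    cases f2 with
    | zero =>
      have : m = 0 := by omega
      subst this
      simp [pvOddPartGo]
    | succ f2 =>
      simp only [pvOddPartGo]
      split
      · rename_i hc
        exact ih f2 (m / 2) (by omega) (by omega)
      · rfl

theorem pvOddPart_odd {m : Nat} (h : m % 2 = 1) : pvOddPart m = m := by
  unfold pvOddPart
  cases m with
  | zero => simp at h
  | succ k => simp only [pvOddPartGo]; rw [if_neg (by omega)]

theorem pvOddPart_even {m : Nat} (h : m % 2 = 0) (h0 : m ≠ 0) :
    pvOddPart m = pvOddPart (m / 2) := by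
  unfold pvOddPart
  cases m with
  | zero => simp at h0
  | succ k =>
    simp only [pvOddPartGo]
    rw [if_pos (by omega)]
    exact pvOddPartGo_fuel k ((k + 1) / 2) ((k + 1) / 2) (by omega) le_rfl

theorem pvOddPart_double (n : Nat) (h0 : n ≠ 0) : pvOddPart (2 * n) = pvOddPart n := by
  rw [pvOddPart_even (by omega) (by omega), Nat.mul_div_cancel_left n (by norm_num)]

theorem pvOddPart_mod_two {m : Nat} (h0 : m ≠ 0) : pvOddPart m % 2 = 1 := by
  induction m using Nat.strong_induction_on with
  | _ m ih =>
    rcases Nat.even_or_odd m with he | ho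
    · have hm := Nat.even_iff.mp he
      rw [pvOddPart_even hm h0]
      exact ih (m / 2) (by omega) (by omega)
    · rw [pvOddPart_odd (Nat.odd_iff.mp ho)]; exact Nat.odd_iff.mp ho

theorem pvOddPart_pow2 (k : Nat) : pvOddPart (2 ^ k) = 1 := by
  induction k with
  | zero => decide
  | succ k ih => rw [pow_succ, mul_comm, pvOddPart_double _ (by positivity)]; exact ih

-- the paperfolding symmetry: odd parts of 2^k + j and 2^k - j are complementary mod 4
theorem pvKey : ∀ j k, 1 ≤ k → 1 ≤ j → j < 2 ^ k →
    pvOddPart (2 ^ k + j) % 4 + pvOddPart (2 ^ k - j) % 4 = 4 := by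
  intro j
  induction j using Nat.strong_induction_on with
  | _ j ih =>
    intro k hk h1 h2
    rcases Nat.even_or_odd j with he | ho
    · -- j even: j ≥ 2 forces k ≥ 2; halve everything
      have hje := Nat.even_iff.mp he
      have hj2 : j / 2 ≥ 1 := by omega
      have hk2 : 2 ≤ k := by
        by_contra h
        have hk1 : k = 1 := by omega
        rw [hk1] at h2
        norm_num at h2
        omega
      have hlt : j / 2 < 2 ^ (k - 1) := by
        have : 2 ^ k = 2 * 2 ^ (k - 1) := by
          rw [← pow_succ']; congr 1; omega
        omega
      have hp : 2 ^ k = 2 * 2 ^ (k - 1) := by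
        rw [← pow_succ']; congr 1; omega
    -- rewrite both arguments as doubles
      have e1 : 2 ^ k + j = 2 * (2 ^ (k - 1) + j / 2) := by omega
      have e2 : 2 ^ k - j = 2 * (2 ^ (k - 1) - j / 2) := by omega
      rw [e1, e2, pvOddPart_double _ (by positivity),
        pvOddPart_double _ (by omega)]
      exact ih (j / 2) (by omega) (k - 1) (by omega) hj2 hlt
    · -- j odd: both numbers odd, sum is 2^(k+1) ≡ 0 mod 4
      have hjo := Nat.odd_iff.mp ho
      have o1 : (2 ^ k + j) % 2 = 1 := by
        have : 2 ^ k % 2 = 0 := by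
          have : (2 : Nat) ∣ 2 ^ k := dvd_pow_self 2 (by omega)
          omega
        omega
      have o2 : (2 ^ k - j) % 2 = 1 := by
        have h2k : 2 ^ k % 2 = 0 := by
          have : (2 : Nat) ∣ 2 ^ k := dvd_pow_self 2 (by omega)
          omega
        omega
      rw [pvOddPart_odd o1, pvOddPart_odd o2]
      have hsum : (2 ^ k + j) + (2 ^ k - j) = 2 ^ (k + 1) := by
        have : 2 ^ (k + 1) = 2 * 2 ^ k := by rw [pow_succ]; ring
        omega
      have h4 : (4 : Nat) ∣ 2 ^ (k + 1) := by
        have : (4 : Nat) = 2 ^ 2 := by norm_num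
        rw [this]
        exact pow_dvd_pow 2 (by omega)
      omega

def pvFlip (c : Char) : Char := if c = '0' then '1' else '0'

theorem pvSwitch_go (l : List Char) : ∀ acc, (∀ c ∈ l, c = '0' ∨ c = '1') →
    l.foldl (fun new_string i =>
      if i = '0' then new_string ++ ['1']
      else if i = '1' then new_string ++ ['0']
      else new_string) acc = acc ++ l.map pvFlip := by
  induction l with
  | nil => simp
  | cons c l ih =>
    intro acc h
    rcases h c (by simp) with hc | hc <;>
      simp [List.foldl_cons, hc, pvFlip,
        ih _ (fun d hd => h d (List.mem_cons_of_mem _ hd)), List.append_assoc]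

theorem pvSwitch_eq_map (l : List Char) (h : ∀ c ∈ l, c = '0' ∨ c = '1') :
    pvSwitch l = l.map pvFlip := by
  unfold pvSwitch; simpa using pvSwitch_go l [] h

theorem pvP_mem (k : Nat) : ∀ c ∈ pvP k, c = '0' ∨ c = '1' := by
  intro c hc
  simp only [pvP, List.mem_map] at hc
  obtain ⟨i, -, rfl⟩ := hc
  unfold pvPf; split <;> simp

theorem pvP_length (k : Nat) : (pvP k).length = 2 ^ k - 1 := by
  simp [pvP]

theorem pvP_get (k i : Nat) (h : i < 2 ^ k - 1) : (pvP k)[i]'(by simpa [pvP_length]) = pvPf (i + 1) := by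
  simp [pvP]

theorem pvPf_sym (k j : Nat) (hk : 1 ≤ k) (h1 : 1 ≤ j) (h2 : j < 2 ^ k) :
    pvPf (2 ^ k + j) = pvFlip (pvPf (2 ^ k - j)) := by
  have key := pvKey j k hk h1 h2
  have o1 := pvOddPart_mod_two (m := 2 ^ k + j) (by positivity)
  have o2 := pvOddPart_mod_two (m := 2 ^ k - j) (by omega)
  unfold pvPf pvFlip
  by_cases h : pvOddPart (2 ^ k + j) % 4 = 1
  · have : pvOddPart (2 ^ k - j) % 4 ≠ 1 := by omega
    simp [h, this]
  · have : pvOddPart (2 ^ k - j) % 4 = 1 := by omega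
    simp [h, this]

theorem pvP_succ (k : Nat) (hk : 1 ≤ k) : pvP (k + 1) = pvStepA (pvP k) := by
  have hlen : (2:Nat) ^ (k + 1) - 1 = (2 ^ k - 1) + 1 + (2 ^ k - 1) := by
    have : (2:Nat) ^ (k + 1) = 2 * 2 ^ k := by rw [pow_succ]; ring
    have h1 : 1 ≤ (2:Nat) ^ k := Nat.one_le_two_pow
    omega
  have h1k : 1 ≤ (2:Nat) ^ k := Nat.one_le_two_pow
  unfold pvStepA pvReverse
  rw [pvSwitch_eq_map _ (by intro c hc; exact pvP_mem k c (List.mem_reverse.mp hc))]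
  apply List.ext_getElem
  · simp [pvP_length, hlen]; omega
  · intro i hi hi'
    simp only [pvP_length] at hi
    rw [pvP_get _ _ (by omega)]
    by_cases hlow : i < 2 ^ k - 1
    · rw [List.getElem_append_left (by simp [pvP_length]; omega),
        List.getElem_append_left (by simp [pvP_length]; omega), pvP_get _ _ hlow]
    · by_cases hmid : i = 2 ^ k - 1
      · subst hmid
        rw [List.getElem_append_left (by simp [pvP_length]),
          List.getElem_append_right (by simp [pvP_length])]
        simp only [pvP_length, Nat.sub_self, List.getElem_cons_zero]
        have h2k : 2 ^ k - 1 + 1 = 2 ^ k := by omega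
        conv_lhs => rw [h2k]
        simp [pvPf, pvOddPart_pow2]
      · -- i = 2^k - 1 + j for 1 ≤ j ≤ 2^k - 2 ... set j := i - (2^k - 1)
        have hj1 : 1 ≤ i - (2 ^ k - 1) := by omega
        have hj2 : i - (2 ^ k - 1) < 2 ^ k := by omega
        rw [List.getElem_append_right (by simp [pvP_length]; omega)]
        simp only [List.length_append, pvP_length, List.length_singleton,
          List.getElem_map, List.getElem_reverse, pvP_length]
        rw [pvP_get]
        · have e1 : i + 1 = 2 ^ k + (i - (2 ^ k - 1)) := by omega
          rw [e1, pvPf_sym k _ hk hj1 hj2]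
          congr 2
          omega
        · omega

theorem pvStepA_iter (m : Nat) : pvP (m + 1) = pvStepA^[m] (pvP 1) := by
  induction m with
  | zero => simp
  | succ m ih =>
    rw [Function.iterate_succ_apply', ← ih, pvP_succ (m + 1) (by omega)]

theorem pvP_one : pvP 1 = ['0'] := by decide

-- foldl with A's loop body = iterating pvStepA (the loop variable is unused)
theorem pvFoldA (l : List Int) : ∀ (q p r : List Char),
    (l.foldl (fun (st : List Char × List Char × List Char) _ =>
        let new_line := st.2.1 ++ ['0'] ++ pvSwitch (pvReverse st.2.1)
        (st.2.1, new_line, new_line)) (q, p, r)).2.1 = pvStepA^[l.length] p ∧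
    (l ≠ [] →
      (l.foldl (fun (st : List Char × List Char × List Char) _ =>
        let new_line := st.2.1 ++ ['0'] ++ pvSwitch (pvReverse st.2.1)
        (st.2.1, new_line, new_line)) (q, p, r)).2.2 = pvStepA^[l.length] p) := by
  induction l with
  | nil => simp
  | cons a l ih =>
    intro q p r
    simp only [List.foldl_cons, List.length_cons]
    have h := ih p (pvStepA p) (pvStepA p)
    constructor
    · rw [(show (pvStepA^[l.length + 1] p) = pvStepA^[l.length] (pvStepA p) from
        Function.iterate_succ_apply _ _ _)]
      exact h.1
    · intro _
      rcases List.eq_nil_or_concat l with rfl | _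
      · simp [pvStepA, pvReverse]
      · rw [(show (pvStepA^[l.length + 1] p) = pvStepA^[l.length] (pvStepA p) from
          Function.iterate_succ_apply _ _ _)]
        exact h.2 (by rename_i hconc; obtain ⟨_, _, rfl⟩ := hconc; simp)

-- foldl appending one char per element = map
theorem pvFoldB (g : Int → Char) (l : List Int) : ∀ acc,
    l.foldl (fun chars n => chars ++ [g n]) acc = acc ++ l.map g := by
  induction l with
  | nil => simp
  | cons a l ih => intro acc; simp [List.foldl_cons, ih, List.append_assoc]

theorem pvAltChars (x : Int) :
    googol_sentence_alt x = String.mk (pvP x.toNat) := by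
  unfold googol_sentence_alt
  rw [pvFoldB, PySem.List.pyRange_one]
  congr 1
  simp only [List.nil_append, pvP, List.map_map]
  have hcast : ((2:Nat) ^ x.toNat : Int) = (2:Int) ^ x.toNat := by push_cast; rfl
  have h1 : 1 ≤ (2:Nat) ^ x.toNat := Nat.one_le_two_pow
  have : ((2:Int) ^ x.toNat - 1).toNat = 2 ^ x.toNat - 1 := by omega
  rw [this]
  apply List.map_congr_left
  intro i hi
  simp only [Function.comp_apply, pvPf]
  have : ((1:Int) + ↑i).toNat = i + 1 := by omega
  rw [this]

-- ===== VERDICT (by name: the statement is the Claim_ definition above) =====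
theorem googol_sentence_spec : Claim_equal_googol_sentence := by
  intro x _ hpre
  unfold Spec_googol_sentence
  unfold Pre_googol_sentence at hpre
  by_cases h4 : x > 3
  · unfold googol_sentence
    rw [if_pos h4, pvAltChars x]
    have hlen : (PySem.List.pyRange 3 (x + 2) 1).length = (x - 1).toNat :=
      by rw [PySem.List.length_pyRange_one]; congr 1; omega
    have hne : PySem.List.pyRange 3 (x + 2) 1 ≠ [] := by
      intro h
      have := congrArg List.length h
      rw [hlen] at this
      simp at this
      omega
    have := (pvFoldA (PySem.List.pyRange 3 (x + 2) 1) [] ['0'] []).2 hne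
    simp only [hlen] at this
    simp only [this]
    rw [← pvP_one, ← pvStepA_iter]
    congr 2
    omega
  · have : x = 0 ∨ x = 1 ∨ x = 2 ∨ x = 3 := by omega
    rcases this with rfl | rfl | rfl | rfl <;> decide
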